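-- pv_equiv track=rewrite | github.com/ulnessd/CobberHumLearn | similarity/GutenbergPackFetcher.py | choose_text_url
-- ===== SOURCE A (Python) =====
-- from typing import Any, Dict, Iterable, List, Optional, Tuple
--
-- def choose_text_url(formats: Dict[str, str]) -> str:
--     if not isinstance(formats, dict):
--         return ""
--     candidates: List[Tuple[int, str]] = []
--     for mime, url in formats.items():
--         if not isinstance(url, str):
--             continue
--         lower_mime = mime.lower()
--         lower_url = url.lower()
--         if "text/plain" not in lower_mime:
--             continue
--         if lower_url.endswith(".zip"):
--             continue
--         score = 0
--         if "utf-8" in lower_mime or "utf-8" in lower_url: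
--             score += 10
--         if "noimages" in lower_url:
--             score += 2
--         if ".txt" in lower_url:
--             score += 1
--         candidates.append((score, url))
--     if not candidates:
--         return ""
--     candidates.sort(reverse=True)
--     return candidates[0][1]
-- ===== SOURCE B (Python) =====
-- def _candidate(mime, url):
--     """Return (score, url) if this entry is an acceptable plain-text candidate, else None."""
--     if not isinstance(url, str):
--         return None
--     lm = mime.lower()
--     lu = url.lower()
--     if "text/plain" not in lm or lu.endswith(".zip"):
--         return None
--     score = 0
--     if "utf-8" in lm or "utf-8" in lu:
--         score += 10
--     if "noimages" in lu:
--         score += 2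
--     if ".txt" in lu:
--         score += 1
--     return (score, url)
--
--
-- def choose_text_url(formats):
--     if not isinstance(formats, dict):
--         return ""
--     best = None
--     for mime, url in formats.items():
--         cand = _candidate(mime, url)
--         if cand is not None and (best is None or cand > best):
--             best = cand
--     return "" if best is None else best[1]
-- ===== Notes on version B (the rewrite author's own statement) =====
-- stated objective: simpler
-- what changed: Instead of collecting all scored candidates into a list and sorting it in reverse to take the first, B keeps a single running best (score, url) tuple updated in one pass (with the filtering/scoring factored into a _candidate helper) and returns its url.
import Mathlib
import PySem

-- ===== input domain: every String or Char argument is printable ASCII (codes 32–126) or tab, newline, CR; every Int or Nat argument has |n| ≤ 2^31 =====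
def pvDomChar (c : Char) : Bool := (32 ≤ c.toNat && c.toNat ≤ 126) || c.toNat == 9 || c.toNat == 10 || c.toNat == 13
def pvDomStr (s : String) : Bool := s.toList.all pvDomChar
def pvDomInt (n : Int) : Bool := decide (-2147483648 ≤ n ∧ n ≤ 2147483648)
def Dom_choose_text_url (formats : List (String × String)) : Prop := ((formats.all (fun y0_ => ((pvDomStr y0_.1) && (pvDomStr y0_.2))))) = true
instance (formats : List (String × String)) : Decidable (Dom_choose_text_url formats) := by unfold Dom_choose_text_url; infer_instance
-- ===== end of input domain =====

-- B replaces A's "collect candidates, sort descending, take the first" by a single pass that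
-- keeps the running best (score, url) tuple — simpler, no intermediate list and no sort.


-- ===== PORT A =====
-- A's loop body: filter and score one (mime, url) entry, appending the candidate.
def pvBodyA (acc : List (Int × String)) (mu : String × String) : List (Int × String) :=
  let lower_mime := PySem.Str.lower mu.1
  let lower_url := PySem.Str.lower mu.2
  if !(PySem.Str.isIn "text/plain" lower_mime) then acc
  else if PySem.Str.endswith lower_url ".zip" then acc
  else
    let score : Int :=
      (if PySem.Str.isIn "utf-8" lower_mime || PySem.Str.isIn "utf-8" lower_url then 10 else 0)
      + (if PySem.Str.isIn "noimages" lower_url then 2 else 0)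
      + (if PySem.Str.isIn ".txt" lower_url then 1 else 0)
    acc ++ [(score, mu.2)]

def choose_text_url (formats : List (String × String)) : String :=
  let candidates : List (Int × String) := formats.foldl pvBodyA []
  if candidates = [] then ""
  else ((PySem.List.sorted2 candidates Prod.fst Prod.snd true).headD (0, "")).2

-- ===== PORT B =====
-- Source B's helper _candidate: Some (score, url) if the entry qualifies, else none.
def pvCandidate (mime url : String) : Option (Int × String) :=
  let lm := PySem.Str.lower mime
  let lu := PySem.Str.lower url
  if !(PySem.Str.isIn "text/plain" lm) || PySem.Str.endswith lu ".zip" then none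
  else
    some ((if PySem.Str.isIn "utf-8" lm || PySem.Str.isIn "utf-8" lu then (10 : Int) else 0)
      + (if PySem.Str.isIn "noimages" lu then 2 else 0)
      + (if PySem.Str.isIn ".txt" lu then 1 else 0), url)

-- Python's tuple comparison 'a > b' on (int, str): lexicographic.
def pvTupGt (a b : Int × String) : Bool :=
  decide (b.1 < a.1) || (decide (a.1 = b.1) && decide (b.2 < a.2))

def choose_text_url_alt (formats : List (String × String)) : String :=
  let best : Option (Int × String) :=
    formats.foldl (fun best mu =>
      match pvCandidate mu.1 mu.2 with
      | none => best
      | some cand =>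
        match best with
        | none => some cand
        | some m => if pvTupGt cand m then some cand else some m) none
  match best with
  | none => ""
  | some m => m.2

-- ===== PRECONDITION & SPEC =====
def Spec_choose_text_url (formats : List (String × String)) (out : String) : Prop := out = choose_text_url_alt formats
instance (formats : List (String × String)) (out : String) : Decidable (Spec_choose_text_url formats out) := by unfold Spec_choose_text_url; infer_instance

-- ===== CLAIM (what is proved, stated in full; the proofs are below) =====
def Claim_equal_choose_text_url : Prop := ∀ (formats : List (String × String)), Dom_choose_text_url formats → Spec_choose_text_url formats (choose_text_url formats)

-- ===== LEMMAS AND PROOFS =====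

-- B's loop step on the running best, applied to one already-accepted candidate.
def pvStepB (b : Option (Int × String)) (c : Int × String) : Option (Int × String) :=
  match b with
  | none => some c
  | some m => if pvTupGt c m then some c else some m

-- sorted2's descending comparator agrees with Python's tuple '>'.
lemma pvBefore_eq_tupGt (x y : Int × String) :
    (decide (y.1 < x.1) || (!decide (x.1 < y.1) && decide (y.2 < x.2))) = pvTupGt x y := by
  unfold pvTupGt
  rcases lt_trichotomy x.1 y.1 with h | h | h
  · simp [h, lt_asymm h, ne_of_lt h]
  · simp [h]
  · simp [h, lt_asymm h, (ne_of_lt h).symm]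

lemma head?_insertBy (before : Int × String → Int × String → Bool) (x : Int × String)
    (ys : List (Int × String)) :
    (PySem.List.insertBy before x ys).head? =
      match ys.head? with
      | none => some x
      | some y => if before x y then some x else some y := by
  cases ys with
  | nil => rfl
  | cons y t => simp only [PySem.List.insertBy]; split <;> simp_all

lemma head?_foldl_insertBy (before : Int × String → Int × String → Bool)
    (xs acc : List (Int × String)) :
    (xs.foldl (fun a x => PySem.List.insertBy before x a) acc).head? =
      xs.foldl (fun b x =>
        match b with
        | none => some x
        | some y => if before x y then some x else some y) acc.head? := by
  induction xs generalizing acc with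
  | nil => rfl
  | cons x t ih =>
    simp only [List.foldl_cons]
    rw [ih, head?_insertBy]

-- head of A's reverse-sorted candidate list = B's running-best fold over the same list.
lemma head?_sorted2_eq_foldl (c : List (Int × String)) :
    (PySem.List.sorted2 c Prod.fst Prod.snd true).head? = c.foldl pvStepB none := by
  show (c.foldl (fun a x => PySem.List.insertBy
      (fun a b => decide (b.1 < a.1) || (!decide (a.1 < b.1) && decide (b.2 < a.2))) x a) []).head? = _
  rw [head?_foldl_insertBy]
  apply PySem.List.foldl_congr_mem
  intro b x _
  cases b with
  | none => rfl
  | some m => show (if _ then _ else _) = pvStepB (some m) x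
              rw [pvBefore_eq_tupGt x m]; rfl

-- one entry: pushing it through A's body then folding = folding then B's step.
lemma step_body (acc : List (Int × String)) (mu : String × String) :
    (pvBodyA acc mu).foldl pvStepB none =
      (match pvCandidate mu.1 mu.2 with
       | none => acc.foldl pvStepB none
       | some cand => pvStepB (acc.foldl pvStepB none) cand) := by
  dsimp only [pvBodyA, pvCandidate]
  split_ifs with h1 h2 h3 <;> simp_all [List.foldl_append, pvStepB]

-- B's whole fold over formats = B's step-fold over A's candidate list.
lemma fold_bridge (formats : List (String × String)) (acc : List (Int × String)) :
    (formats.foldl pvBodyA acc).foldl pvStepB none =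
      formats.foldl (fun best mu =>
        match pvCandidate mu.1 mu.2 with
        | none => best
        | some cand => pvStepB best cand) (acc.foldl pvStepB none) := by
  induction formats generalizing acc with
  | nil => rfl
  | cons mu t ih =>
    simp only [List.foldl_cons]
    rw [ih, step_body]

-- ===== VERDICT (by name: the statement is the Claim_ definition above) =====
theorem choose_text_url_spec : Claim_equal_choose_text_url := by
  intro formats _
  show choose_text_url formats = choose_text_url_alt formats
  unfold choose_text_url choose_text_url_alt
  have hb : (formats.foldl (fun best mu =>
      match pvCandidate mu.1 mu.2 with
      | none => best
      | some cand =>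
        match best with
        | none => some cand
        | some m => if pvTupGt cand m then some cand else some m) none)
      = (PySem.List.sorted2 (formats.foldl pvBodyA []) Prod.fst Prod.snd true).head? := by
    rw [head?_sorted2_eq_foldl, fold_bridge]
    rfl
  rw [hb]
  by_cases hc : formats.foldl pvBodyA [] = []
  · simp [hc, PySem.List.sorted2]
  · have hlen : (PySem.List.sorted2 (formats.foldl pvBodyA []) Prod.fst Prod.snd true) ≠ [] := by
      intro h
      have := (PySem.List.sorted2_perm (formats.foldl pvBodyA []) Prod.fst Prod.snd true).length_eq
      rw [h] at this
      exact hc (List.eq_nil_of_length_eq_zero this.symm)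
    cases hs : PySem.List.sorted2 (formats.foldl pvBodyA []) Prod.fst Prod.snd true with
    | nil => exact absurd hs hlen
    | cons m t => simp [hc, hs]
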